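-- pv_equiv track=rewrite | github.com/peterliu502/Hello_Python | 函数递归.py | buy_cola
-- ===== SOURCE A (Python) =====
-- def buy_cola(money, bottle=0, cap=0, num=0):
--     if (money < 1) & (bottle < 2) & (cap < 3):
--         return num
--     else:
--         cola = 0
--         cola += money  # 钱换可乐
--         money = money % 1  # 结算钱
--         cola += (bottle // 2)  # 瓶子换可乐
--         bottle = bottle % 2  # 结算瓶子
--         cola += (cap // 3)  # 盖子换可乐
--         cap = cap % 3  # 结算盖子
--         num += cola  # 统计可乐
--         bottle += cola  # 产生瓶子
--         cap += cola  # 产生盖子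
--         return buy_cola(money, bottle, cap, num)
-- ===== SOURCE B (Python) =====
-- def buy_cola(money, bottle=0, cap=0, num=0):
--     while not (money < 1 and bottle < 2 and cap < 3):
--         cola = money + bottle // 2 + cap // 3
--         money, bottle, cap = money % 1, bottle % 2 + cola, cap % 3 + cola
--         num += cola
--     return num
-- ===== Notes on version B (the rewrite author's own statement) =====
-- stated objective: simpler
-- what changed: Replaced the tail recursion with its beginning-of-step guard and incremental cola accumulator by a single iterative while-loop that computes cola in one expression and updates the state by simultaneous assignment.
import Mathlib
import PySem

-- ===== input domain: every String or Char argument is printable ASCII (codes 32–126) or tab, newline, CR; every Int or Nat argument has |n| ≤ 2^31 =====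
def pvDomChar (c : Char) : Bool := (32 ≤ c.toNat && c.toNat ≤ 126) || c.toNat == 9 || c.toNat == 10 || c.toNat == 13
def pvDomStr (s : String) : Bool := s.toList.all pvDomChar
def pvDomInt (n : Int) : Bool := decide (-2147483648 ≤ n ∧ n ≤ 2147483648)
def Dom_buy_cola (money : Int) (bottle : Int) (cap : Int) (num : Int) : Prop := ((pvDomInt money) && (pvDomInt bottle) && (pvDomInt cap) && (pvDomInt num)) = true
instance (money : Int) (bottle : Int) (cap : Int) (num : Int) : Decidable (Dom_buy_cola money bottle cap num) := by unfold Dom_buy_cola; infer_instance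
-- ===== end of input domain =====

-- B replaces A's tail recursion by a single iterative while-loop with a one-expression
-- cola computation and simultaneous state update (objective: simpler decomposition).
-- Both ports use a fuel counter solely as a totality guard; the fuel is far larger than
-- the number of exchange rounds any admitted input needs, so it is never exhausted.

-- ===== PORT A =====
-- fuel bound shared by both ports (pure totality guard, never reached on Dom)
def pvFuel (money : Int) (bottle : Int) (cap : Int) : Nat :=
  (money.natAbs + bottle.natAbs + cap.natAbs) * 4 + 16

-- literal transliteration of A's recursion; each Python rebinding becomes a `let`
def buyColaRec : Nat → Int → Int → Int → Int → Int
  | 0, _, _, _, num => num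
  | fuel + 1, money, bottle, cap, num =>
    if money < 1 ∧ bottle < 2 ∧ cap < 3 then num
    else
      let cola : Int := 0
      let cola := cola + money
      let money := PySem.Int.mod money 1
      let cola := cola + PySem.Int.floordiv bottle 2
      let bottle := PySem.Int.mod bottle 2
      let cola := cola + PySem.Int.floordiv cap 3
      let cap := PySem.Int.mod cap 3
      let num := num + cola
      let bottle := bottle + cola
      let cap := cap + cola
      buyColaRec fuel money bottle cap num

def buy_cola (money : Int) (bottle : Int) (cap : Int) (num : Int) : Int :=
  buyColaRec (pvFuel money bottle cap) money bottle cap num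

-- ===== PORT B =====
-- B's while-loop: a stop test and a step function over the state tuple, iterated
def buyColaDone (s : Int × Int × Int × Int) : Bool :=
  s.1 < 1 && s.2.1 < 2 && s.2.2.1 < 3

def buyColaStep (s : Int × Int × Int × Int) : Int × Int × Int × Int :=
  let cola := s.1 + PySem.Int.floordiv s.2.1 2 + PySem.Int.floordiv s.2.2.1 3
  (PySem.Int.mod s.1 1, PySem.Int.mod s.2.1 2 + cola, PySem.Int.mod s.2.2.1 3 + cola,
   s.2.2.2 + cola)

def buyColaLoop : Nat → (Int × Int × Int × Int) → Int
  | 0, s => s.2.2.2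
  | fuel + 1, s => if buyColaDone s then s.2.2.2 else buyColaLoop fuel (buyColaStep s)

def buy_cola_alt (money : Int) (bottle : Int) (cap : Int) (num : Int) : Int :=
  buyColaLoop (pvFuel money bottle cap) (money, bottle, cap, num)

-- ===== PRECONDITION & SPEC =====
def Spec_buy_cola (money : Int) (bottle : Int) (cap : Int) (num : Int) (out : Int) : Prop := out = buy_cola_alt money bottle cap num
instance (money : Int) (bottle : Int) (cap : Int) (num : Int) (out : Int) : Decidable (Spec_buy_cola money bottle cap num out) := by unfold Spec_buy_cola; infer_instance

-- ===== CLAIM (what is proved, stated in full; the proofs are below) =====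
def Claim_equal_buy_cola : Prop := ∀ (money : Int) (bottle : Int) (cap : Int) (num : Int), Dom_buy_cola money bottle cap num → Spec_buy_cola money bottle cap num (buy_cola money bottle cap num)

-- ===== LEMMAS AND PROOFS =====
theorem buyColaRec_eq_loop (fuel : Nat) :
    ∀ (money bottle cap num : Int),
      buyColaRec fuel money bottle cap num = buyColaLoop fuel (money, bottle, cap, num) := by
  induction fuel with
  | zero => intro m b c n; rfl
  | succ f ih =>
    intro m b c n
    simp only [buyColaRec, buyColaLoop, buyColaDone, buyColaStep]
    by_cases h : m < 1 ∧ b < 2 ∧ c < 3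
    · simp [h]
    · have hb : ¬ ((decide (m < 1) && decide (b < 2) && decide (c < 3)) = true) := by
        simpa [and_assoc] using h
      simp only [if_neg h, if_neg hb, ih]
      ring_nf

theorem buy_cola_spec : Claim_equal_buy_cola := by
  intro m b c n _
  unfold Spec_buy_cola buy_cola buy_cola_alt
  exact buyColaRec_eq_loop _ m b c n
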